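-- pv_equiv track=rewrite | github.com/elhamekhoda/TTResStat | scripts/manual_combination/combine_configs.py | combine_region
-- ===== SOURCE A (Python) =====
-- def combine_region(region_1l, region_2l):
--     region_1l = {k: v for k,v in region_1l}
--     region_2l = {k: v for k,v in region_2l}
--     region_combined = []
--     keys = set(region_1l.keys()) | set(region_2l.keys())
--     for key in keys:
--         if key not in region_1l:
--             region_combined.append((key, region_2l[key]))
--         elif key not in region_2l:
--             region_combined.append((key, region_1l[key]))
--         elif region_1l[key] == region_2l[key]:
--             region_combined.append((key, region_1l[key]))
--         else:
--             raise RuntimeError('Region settings are different.')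
--
--     # sort region_combined based on type, then name
--     region_combined.sort(key=lambda x: (x[1]['Type'], x[0]))
--
--
--     return region_combined
-- ===== SOURCE B (Python) =====
-- def combine_region(region_1l, region_2l):
--     # Merge of two sorted runs: dedup each side, sort each side once, then a
--     # single two-pointer pass that interleaves them and collapses common keys.
--     key = lambda x: (x[1]['Type'], x[0])
--     l1 = sorted(dict(region_1l).items(), key=key)
--     l2 = sorted(dict(region_2l).items(), key=key)
--     out = []
--     i = j = 0
--     while i < len(l1) and j < len(l2):
--         if l1[i][0] == l2[j][0]:
--             if l1[i][1] != l2[j][1]: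
--                 raise RuntimeError('Region settings are different.')
--             out.append(l1[i])
--             i += 1
--             j += 1
--         elif key(l1[i]) < key(l2[j]):
--             out.append(l1[i])
--             i += 1
--         else:
--             out.append(l2[j])
--             j += 1
--     out.extend(l1[i:])
--     out.extend(l2[j:])
--     return out
-- ===== Notes on version B (the rewrite author's own statement) =====
-- stated objective: alternative
-- what changed: Instead of A's union of the two key sets, a 4-branch loop over that union and one final sort of the merged list, B sorts each de-duplicated side once and produces the result with a single two-pointer merge of the two sorted runs, collapsing common keys as they meet.
import Mathlib
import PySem

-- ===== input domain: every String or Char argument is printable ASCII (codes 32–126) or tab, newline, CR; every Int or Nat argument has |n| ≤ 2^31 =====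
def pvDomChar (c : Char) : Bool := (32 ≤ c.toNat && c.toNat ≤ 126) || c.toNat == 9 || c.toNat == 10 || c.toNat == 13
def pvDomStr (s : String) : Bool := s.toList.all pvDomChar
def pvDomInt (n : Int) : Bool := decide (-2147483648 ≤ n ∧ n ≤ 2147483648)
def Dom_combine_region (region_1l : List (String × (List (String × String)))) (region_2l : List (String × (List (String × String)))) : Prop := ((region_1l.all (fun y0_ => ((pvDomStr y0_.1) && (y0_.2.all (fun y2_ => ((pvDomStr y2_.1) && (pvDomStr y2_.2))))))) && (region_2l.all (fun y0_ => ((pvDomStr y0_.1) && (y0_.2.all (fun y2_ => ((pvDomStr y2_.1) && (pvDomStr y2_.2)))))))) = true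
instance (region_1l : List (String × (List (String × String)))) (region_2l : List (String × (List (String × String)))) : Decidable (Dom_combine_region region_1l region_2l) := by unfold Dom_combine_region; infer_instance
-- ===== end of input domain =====

-- B replaces A's key-set-union loop followed by a sort of the merged list by a merge of two sorted
-- runs: each de-duplicated side is sorted once and a single two-pointer pass interleaves them,
-- collapsing common keys (objective: alternative; same return value).

-- Python's '==' on two dicts (order-insensitive: same keys, same value per key); used by both ports.
def pvDictEq (a b : List (String × String)) : Bool :=
  let da := PySem.Dict.ofList a
  let db := PySem.Dict.ofList b
  da.size == db.size && da.items.all (fun p => db.get? p.1 == some p.2)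

-- first component of both Pythons' sort key: x[1]['Type'] ('Type' present by Pre_)
def cr_keyT (p : String × List (String × String)) : String :=
  (PySem.Dict.ofList p.2).getD "Type" ""

-- ===== PORT A =====
def combine_region (region_1l : List (String × (List (String × String)))) (region_2l : List (String × (List (String × String)))) : List (String × (List (String × String))) :=
  let d1 := PySem.Dict.ofList region_1l              -- {k: v for k,v in region_1l}
  let d2 := PySem.Dict.ofList region_2l              -- {k: v for k,v in region_2l}
  let keys := PySem.Set.union (PySem.Set.ofList d1.keys) (PySem.Set.ofList d2.keys)
  -- for key in keys: … (final result is order-independent: the sort key below is injective on it)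
  let region_combined := keys.foldl (fun acc key =>
    if d1.contains key = false then acc ++ [(key, d2.getD key [])]
    else if d2.contains key = false then acc ++ [(key, d1.getD key [])]
    else if pvDictEq (d1.getD key []) (d2.getD key []) then acc ++ [(key, d1.getD key [])]
    else acc)                                        -- Python: raise RuntimeError (excluded by Pre_)
    []
  -- region_combined.sort(key=lambda x: (x[1]['Type'], x[0]))
  PySem.List.sorted2 region_combined cr_keyT (fun x => x.1)

-- ===== PORT B =====
-- Python tuple comparison key(l1[i]) < key(l2[j]) on the (Type, name) keys
def cr_keyLt (a b : String × List (String × String)) : Bool :=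
  decide (cr_keyT a < cr_keyT b) || (cr_keyT a == cr_keyT b && decide (a.1 < b.1))

-- the while loop over i, j: one pointer advances per iteration (both on a common key)
def cr_merge : List (String × List (String × String)) → List (String × List (String × String)) → List (String × List (String × String))
  | [], l2 => l2                                     -- i = len(l1): out.extend(l2[j:])
  | a :: t1, [] => a :: t1                           -- j = len(l2): out.extend(l1[i:])
  | a :: t1, b :: t2 =>
    if a.1 == b.1 then
      -- l1[i][1] != l2[j][1] would raise RuntimeError in Python; excluded by Pre_
      a :: cr_merge t1 t2
    else if cr_keyLt a b then a :: cr_merge t1 (b :: t2)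
    else b :: cr_merge (a :: t1) t2
termination_by l1 l2 => l1.length + l2.length
decreasing_by all_goals (simp only [List.length_cons]; omega)

def combine_region_alt (region_1l : List (String × (List (String × String)))) (region_2l : List (String × (List (String × String)))) : List (String × (List (String × String))) :=
  let l1 := PySem.List.sorted2 (PySem.Dict.ofList region_1l).items cr_keyT (fun x => x.1)
  let l2 := PySem.List.sorted2 (PySem.Dict.ofList region_2l).items cr_keyT (fun x => x.1)
  cr_merge l1 l2

-- ===== PRECONDITION & SPEC =====
-- Pre_ excludes exactly the inputs where the Python raises: a key present in both dicts with
-- unequal values (RuntimeError), or a merged value dict lacking the 'Type' key (KeyError in the sort key).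
def Pre_combine_region (region_1l : List (String × (List (String × String)))) (region_2l : List (String × (List (String × String)))) : Prop :=
  (∀ k ∈ (PySem.Dict.ofList region_1l).keys,
      (PySem.Dict.ofList region_2l).contains k = true →
      pvDictEq ((PySem.Dict.ofList region_1l).getD k []) ((PySem.Dict.ofList region_2l).getD k []) = true) ∧
  (∀ v ∈ (PySem.Dict.ofList region_1l).values, (PySem.Dict.ofList v).contains "Type" = true) ∧
  (∀ v ∈ (PySem.Dict.ofList region_2l).values, (PySem.Dict.ofList v).contains "Type" = true)
instance (region_1l : List (String × (List (String × String)))) (region_2l : List (String × (List (String × String)))) : Decidable (Pre_combine_region region_1l region_2l) := by unfold Pre_combine_region; infer_instance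

def pvWitness_combine_region : (List (String × (List (String × String)))) × (List (String × (List (String × String)))) :=
  ([("SR1", [("Type", "signal"), ("Binning", "fine")])],
   [("CR1", [("Type", "control")]), ("SR1", [("Binning", "fine"), ("Type", "signal")])])

def Spec_combine_region (region_1l : List (String × (List (String × String)))) (region_2l : List (String × (List (String × String)))) (out : List (String × (List (String × String)))) : Prop := out = combine_region_alt region_1l region_2l
instance (region_1l : List (String × (List (String × String)))) (region_2l : List (String × (List (String × String)))) (out : List (String × (List (String × String)))) : Decidable (Spec_combine_region region_1l region_2l out) := by unfold Spec_combine_region; infer_instance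

-- ===== CLAIM (what is proved, stated in full; the proofs are below) =====
def Claim_equal_combine_region : Prop := ∀ (region_1l : List (String × (List (String × String)))) (region_2l : List (String × (List (String × String)))), Dom_combine_region region_1l region_2l → Pre_combine_region region_1l region_2l → Spec_combine_region region_1l region_2l (combine_region region_1l region_2l)

-- ===== LEMMAS AND PROOFS =====

-- the lexicographic (Type, name) sort key both Pythons order by
def cr_lexF (p : String × List (String × String)) : Lex (String × String) :=
  toLex (cr_keyT p, p.1)

theorem cr_lexF_eq_fst {a b : String × List (String × String)} (h : cr_lexF a = cr_lexF b) :
    a.1 = b.1 := by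
  have := toLex.injective h
  exact congrArg Prod.snd this

-- tuple-key sorted2 is sorted by the lex key
-- sorted2's pairwise comparison IS the lexicographic order on (Type, name)
theorem cr_before_eq_lex (a b : String × List (String × String)) :
    (decide (cr_keyT a < cr_keyT b) || (!decide (cr_keyT b < cr_keyT a) && decide (a.1 < b.1)))
      = decide (cr_lexF a < cr_lexF b) := by
  rw [Bool.eq_iff_iff]
  simp only [Bool.or_eq_true, Bool.and_eq_true, Bool.not_eq_true', decide_eq_true_iff,
    decide_eq_false_iff_not, cr_lexF, Prod.Lex.toLex_lt_toLex]
  constructor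
  · rintro (h | ⟨h1, h2⟩)
    · exact Or.inl h
    · rcases lt_trichotomy (cr_keyT a) (cr_keyT b) with h | h | h
      · exact Or.inl h
      · exact Or.inr ⟨h, h2⟩
      · exact absurd h h1
  · rintro (h | ⟨h1, h2⟩)
    · exact Or.inl h
    · exact Or.inr ⟨by rw [h1]; exact lt_irrefl _, h2⟩

theorem cr_sorted2_eq_sorted_lex (xs : List (String × List (String × String))) :
    PySem.List.sorted2 xs cr_keyT (fun x => x.1) = PySem.List.sorted xs cr_lexF := by
  simp only [PySem.List.sorted2, PySem.List.sorted]
  congr 1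
  funext acc x
  congr 1
  funext a b
  exact cr_before_eq_lex a b

theorem cr_keyLt_iff {a b : String × List (String × String)} :
    cr_keyLt a b = true ↔ cr_lexF a < cr_lexF b := by
  simp only [cr_keyLt, cr_lexF, Bool.or_eq_true, Bool.and_eq_true, decide_eq_true_iff,
    beq_iff_eq, Prod.Lex.toLex_lt_toLex]

-- Dict.contains agrees with List.contains on the key list.
theorem pv_dcontains_eq {V : Type} (d : PySem.Dict String V) (k : String) :
    d.contains k = d.keys.contains k := by
  rw [Bool.eq_iff_iff, PySem.Dict.contains_iff_mem_keys, List.contains_iff_mem]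

-- s.update(ys) for duplicate-free ys appends the elements of ys not already in s.
theorem pv_update_shape (ys : List String) : ∀ (s : List String), ys.Nodup →
    PySem.Set.update s ys = s ++ ys.filter (fun y => !s.contains y) := by
  induction ys with
  | nil => intro s _; simp [PySem.Set.update]
  | cons y t ih =>
    intro s hnd
    rw [List.nodup_cons] at hnd
    by_cases h : s.contains y
    · have hm : y ∈ s := by simpa using h
      have hadd : PySem.Set.add s y = s := by
        simp [PySem.Set.add, PySem.Set.contains, hm]
      show PySem.Set.update (PySem.Set.add s y) t = _
      rw [hadd, ih s hnd.2]
      simp [hm]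
    · have hm : y ∉ s := by simpa using h
      have hadd : PySem.Set.add s y = s ++ [y] := by
        simp [PySem.Set.add, PySem.Set.contains, hm]
      show PySem.Set.update (PySem.Set.add s y) t = _
      rw [hadd, ih (s ++ [y]) hnd.2]
      have hfil : t.filter (fun q => !(s ++ [y]).contains q) = t.filter (fun q => !s.contains q) := by
        apply List.filter_congr
        intro q hq
        have hqy : q ≠ y := fun hqe => hnd.1 (hqe ▸ hq)
        simp [hqy]
      rw [hfil]
      simp [hm]

theorem pv_ofList_nodup (xs : List String) (h : xs.Nodup) : PySem.Set.ofList xs = xs := by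
  have := pv_update_shape xs [] h
  simpa [PySem.Set.update, PySem.Set.ofList, PySem.Set.empty] using this

-- set(xs) | set(ys) as a list, for duplicate-free xs ys.
theorem pv_union_shape (xs ys : List String) (hx : xs.Nodup) (hy : ys.Nodup) :
    PySem.Set.union (PySem.Set.ofList xs) (PySem.Set.ofList ys)
      = xs ++ ys.filter (fun y => !xs.contains y) := by
  show PySem.Set.update (PySem.Set.ofList xs) (PySem.Set.ofList ys) = _
  rw [pv_ofList_nodup xs hx, pv_ofList_nodup ys hy, pv_update_shape ys xs hy]

-- Python dict equality makes every lookup agree.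
theorem pv_dictEq_get? {x y : List (String × String)} (h : pvDictEq x y = true) (k : String) :
    (PySem.Dict.ofList x).get? k = (PySem.Dict.ofList y).get? k := by
  simp only [pvDictEq, Bool.and_eq_true, beq_iff_eq, List.all_eq_true] at h
  obtain ⟨hsize, hall⟩ := h
  set da := PySem.Dict.ofList x
  set db := PySem.Dict.ofList y
  have hnda : da.keys.Nodup := PySem.Dict.nodup_keys_ofList x
  have hndb : db.keys.Nodup := PySem.Dict.nodup_keys_ofList y
  have hsub : da.keys ⊆ db.keys := by
    intro k' hk'
    simp only [PySem.Dict.keys, List.mem_map] at hk'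
    obtain ⟨p, hp, hpk⟩ := hk'
    exact hpk ▸ PySem.Dict.mem_keys_of_mem_items _ (PySem.Dict.mem_items_of_get?_eq_some _ (hall p hp))
  have hlen : db.keys.length ≤ da.keys.length := by
    have : da.keys.length = db.keys.length := by
      simp only [PySem.Dict.keys, List.length_map]
      simpa [PySem.Dict.size] using hsize
    omega
  have hmemiff : ∀ k', k' ∈ da.keys ↔ k' ∈ db.keys := by
    have hperm := (List.subperm_of_subset hnda hsub).perm_of_length_le hlen
    exact fun k' => hperm.mem_iff
  cases hga : da.get? k with
  | some v =>
    rw [hall (k, v) (PySem.Dict.mem_items_of_get?_eq_some _ hga)]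
  | none =>
    have hka : k ∉ da.keys := by
      rw [← PySem.Dict.get?_eq_none_iff_not_mem_keys]
      exact hga
    have hkb : k ∉ db.keys := fun hk => hka ((hmemiff k).mpr hk)
    rw [(PySem.Dict.get?_eq_none_iff_not_mem_keys _ _).mpr hkb]

theorem pv_dictEq_keyT {x y : List (String × String)} (h : pvDictEq x y = true) :
    (PySem.Dict.ofList x).getD "Type" "" = (PySem.Dict.ofList y).getD "Type" "" := by
  rw [PySem.Dict.getD_eq_get?_getD, PySem.Dict.getD_eq_get?_getD, pv_dictEq_get? h]

-- the heart of B: the two-pointer merge of two strictly key-sorted runs whose common names carry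
-- equal keys is a strictly key-sorted permutation of "first run ++ second run minus common names"
theorem cr_merge_main : ∀ (n : Nat) (l1 l2 : List (String × List (String × String))),
    l1.length + l2.length ≤ n →
    l1.Pairwise (fun a b => cr_lexF a < cr_lexF b) →
    l2.Pairwise (fun a b => cr_lexF a < cr_lexF b) →
    (∀ a ∈ l1, ∀ b ∈ l2, a.1 = b.1 → cr_lexF a = cr_lexF b) →
    (cr_merge l1 l2).Perm (l1 ++ l2.filter (fun b => !(l1.any (fun a => a.1 == b.1)))) ∧
    (cr_merge l1 l2).Pairwise (fun a b => cr_lexF a < cr_lexF b) := by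
  intro n
  induction n with
  | zero =>
    intro l1 l2 hlen _ _ _
    have h1 : l1 = [] := List.eq_nil_of_length_eq_zero (by omega)
    have h2 : l2 = [] := List.eq_nil_of_length_eq_zero (by omega)
    subst h1; subst h2
    simp [cr_merge]
  | succ n ih =>
    intro l1 l2 hlen h1 h2 hcross
    match l1, l2 with
    | [], l2 =>
      simp only [cr_merge, List.any_nil, Bool.not_false, List.filter_true, List.nil_append]
      exact ⟨List.Perm.refl _, h2⟩
    | a :: t1, [] =>
      simp only [cr_merge, List.filter_nil, List.append_nil]
      exact ⟨List.Perm.refl _, h1⟩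
    | a :: t1, b :: t2 =>
      rw [List.pairwise_cons] at h1 h2
      by_cases hname : a.1 = b.1
      · -- common key: both pointers advance, a's entry is kept
        have hbeq : (a.1 == b.1) = true := beq_iff_eq.mpr hname
        have hk : cr_lexF a = cr_lexF b :=
          hcross a (List.mem_cons_self) b (List.mem_cons_self) hname
        have ht2 : ∀ c ∈ t2, c.1 ≠ a.1 := by
          intro c hc hcn
          have h1e : cr_lexF a = cr_lexF c :=
            hcross a List.mem_cons_self c (List.mem_cons_of_mem _ hc) hcn.symm
          have := h2.1 c hc
          rw [← hk, ← h1e] at this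
          exact lt_irrefl _ this
        obtain ⟨ihp, ihs⟩ := ih t1 t2 (by simp at hlen ⊢; omega) h1.2 h2.2
          (fun a' ha' b' hb' => hcross a' (List.mem_cons_of_mem _ ha') b' (List.mem_cons_of_mem _ hb'))
        have hunfold : cr_merge (a :: t1) (b :: t2) = a :: cr_merge t1 t2 := by
          rw [cr_merge]; simp [hbeq]
        have hfil : (b :: t2).filter (fun c => !((a :: t1).any (fun a' => a'.1 == c.1)))
            = t2.filter (fun c => !(t1.any (fun a' => a'.1 == c.1))) := by
          rw [List.filter_cons]
          have : ((a :: t1).any (fun a' => a'.1 == b.1)) = true := by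
            simp [List.any_cons, hbeq]
          rw [if_neg (by simp [this])]
          apply List.filter_congr
          intro c hc
          have : (a.1 == c.1) = false := beq_eq_false_iff_ne.mpr (fun he => ht2 c hc he.symm)
          simp [List.any_cons, this]
        constructor
        · rw [hunfold, hfil, List.cons_append]
          exact ihp.cons a
        · rw [hunfold]
          refine List.pairwise_cons.mpr ⟨?_, ihs⟩
          intro x hx
          have hx' := ihp.mem_iff.mp hx
          rcases List.mem_append.mp hx' with hxt | hxf
          · exact h1.1 x hxt
          · have hxt2 := List.mem_of_mem_filter hxf
            exact hk ▸ h2.1 x hxt2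
      · have hbeq : (a.1 == b.1) = false := beq_eq_false_iff_ne.mpr hname
        by_cases hlt : cr_keyLt a b = true
        · -- a strictly first: advance i
          have hlt' : cr_lexF a < cr_lexF b := cr_keyLt_iff.mp hlt
          have hnone : ∀ c ∈ (b :: t2), c.1 ≠ a.1 := by
            intro c hc hcn
            rcases List.mem_cons.mp hc with rfl | hct
            · exact hname hcn.symm
            · have he : cr_lexF a = cr_lexF c :=
                hcross a List.mem_cons_self c (List.mem_cons_of_mem _ hct) hcn.symm
              have := h2.1 c hct
              rw [← he] at this
              exact lt_irrefl _ (hlt'.trans this)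
          obtain ⟨ihp, ihs⟩ := ih t1 (b :: t2) (by simp at hlen ⊢; omega) h1.2
            (List.pairwise_cons.mpr h2)
            (fun a' ha' b' hb' => hcross a' (List.mem_cons_of_mem _ ha') b' hb')
          have hunfold : cr_merge (a :: t1) (b :: t2) = a :: cr_merge t1 (b :: t2) := by
            rw [cr_merge]; simp [hbeq, hlt]
          have hfil : (b :: t2).filter (fun c => !((a :: t1).any (fun a' => a'.1 == c.1)))
              = (b :: t2).filter (fun c => !(t1.any (fun a' => a'.1 == c.1))) := by
            apply List.filter_congr
            intro c hc
            have : (a.1 == c.1) = false := beq_eq_false_iff_ne.mpr (fun he => hnone c hc he.symm)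
            simp [List.any_cons, this]
          constructor
          · rw [hunfold, hfil, List.cons_append]
            exact ihp.cons a
          · rw [hunfold]
            refine List.pairwise_cons.mpr ⟨?_, ihs⟩
            intro x hx
            have hx' := ihp.mem_iff.mp hx
            rcases List.mem_append.mp hx' with hxt | hxf
            · exact h1.1 x hxt
            · rcases List.mem_cons.mp (List.mem_of_mem_filter hxf) with rfl | hxt2
              · exact hlt'
              · exact hlt'.trans (h2.1 x hxt2)
        · -- b strictly first: advance j
          have hne : cr_lexF a ≠ cr_lexF b := fun he => hname (cr_lexF_eq_fst he)
          have hgt : cr_lexF b < cr_lexF a := by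
            rcases lt_trichotomy (cr_lexF a) (cr_lexF b) with h | h | h
            · exact absurd (cr_keyLt_iff.mpr h) hlt
            · exact absurd h hne
            · exact h
          have hbfree : ∀ c ∈ (a :: t1), c.1 ≠ b.1 := by
            intro c hc hcn
            rcases List.mem_cons.mp hc with rfl | hct
            · exact hname hcn
            · have he : cr_lexF c = cr_lexF b :=
                hcross c (List.mem_cons_of_mem _ hct) b List.mem_cons_self hcn
              have := h1.1 c hct
              rw [he] at this
              exact lt_irrefl _ (hgt.trans this)
          obtain ⟨ihp, ihs⟩ := ih (a :: t1) t2 (by simp at hlen ⊢; omega)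
            (List.pairwise_cons.mpr h1) h2.2
            (fun a' ha' b' hb' => hcross a' ha' b' (List.mem_cons_of_mem _ hb'))
          have hunfold : cr_merge (a :: t1) (b :: t2) = b :: cr_merge (a :: t1) t2 := by
            rw [cr_merge]; simp [hbeq, hlt]
          have hfilb : (b :: t2).filter (fun c => !((a :: t1).any (fun a' => a'.1 == c.1)))
              = b :: t2.filter (fun c => !((a :: t1).any (fun a' => a'.1 == c.1))) := by
            rw [List.filter_cons, if_pos]
            simp only [Bool.not_eq_eq_eq_not, Bool.not_true, List.any_eq_false]
            intro a' ha'
            simpa using beq_eq_false_iff_ne.mpr (hbfree a' ha')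
          constructor
          · rw [hunfold, hfilb]
            exact ((ihp.cons b).trans List.perm_middle.symm)
          · rw [hunfold]
            refine List.pairwise_cons.mpr ⟨?_, ihs⟩
            intro x hx
            have hx' := ihp.mem_iff.mp hx
            rcases List.mem_append.mp hx' with hxt | hxf
            · rcases List.mem_cons.mp hxt with rfl | hxt1
              · exact hgt
              · exact hgt.trans (h1.1 x hxt1)
            · exact h2.1 x (List.mem_of_mem_filter hxf)

-- sorted d.items is STRICTLY increasing under the lex key (names are unique)
theorem cr_sorted_items_strict (r : List (String × (List (String × String)))) :
    (PySem.List.sorted (PySem.Dict.ofList r).items cr_lexF).Pairwise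
      (fun a b => cr_lexF a < cr_lexF b) := by
  set d := PySem.Dict.ofList r
  have hle : (PySem.List.sorted d.items cr_lexF).Pairwise (fun a b => cr_lexF a ≤ cr_lexF b) :=
    PySem.List.sorted_pairwise d.items cr_lexF
  have hperm : (PySem.List.sorted d.items cr_lexF).Perm d.items :=
    PySem.List.sorted_perm d.items cr_lexF false
  have hnd : ((PySem.List.sorted d.items cr_lexF).map Prod.fst).Nodup := by
    have : d.items.map Prod.fst = d.keys := rfl
    exact ((hperm.map Prod.fst).nodup_iff).mpr (this ▸ PySem.Dict.nodup_keys_ofList r)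
  have hne : (PySem.List.sorted d.items cr_lexF).Pairwise (fun a b => a.1 ≠ b.1) := by
    rw [List.nodup_iff_pairwise_ne, List.pairwise_map] at hnd
    exact hnd
  refine (hle.and hne).imp ?_
  rintro a b ⟨hab, hne'⟩
  exact lt_of_le_of_ne hab (fun he => hne' (cr_lexF_eq_fst he))

-- ===== VERDICT (by name: the statement is the Claim_ definition above) =====
theorem combine_region_spec : Claim_equal_combine_region := by
  intro region_1l region_2l _ hpre
  show combine_region region_1l region_2l = combine_region_alt region_1l region_2l
  simp only [combine_region, combine_region_alt]
  set d1 := PySem.Dict.ofList region_1l with hd1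
  set d2 := PySem.Dict.ofList region_2l with hd2
  have hnd1 : d1.keys.Nodup := PySem.Dict.nodup_keys_ofList region_1l
  have hnd2 : d2.keys.Nodup := PySem.Dict.nodup_keys_ofList region_2l
  -- A's loop output is d1.items ++ (items of d2 whose key is new)
  have hM :
      (PySem.Set.union (PySem.Set.ofList d1.keys) (PySem.Set.ofList d2.keys)).foldl
        (fun acc key =>
          if d1.contains key = false then acc ++ [(key, d2.getD key [])]
          else if d2.contains key = false then acc ++ [(key, d1.getD key [])]
          else if pvDictEq (d1.getD key []) (d2.getD key []) then acc ++ [(key, d1.getD key [])]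
          else acc) []
      = d1.items ++ d2.items.filter (fun p => !d1.contains p.1) := by
    have hcongr :
        ∀ (acc : List (String × List (String × String))) (key : String),
          (if d1.contains key = false then acc ++ [(key, d2.getD key [])]
           else if d2.contains key = false then acc ++ [(key, d1.getD key [])]
           else if pvDictEq (d1.getD key []) (d2.getD key []) then acc ++ [(key, d1.getD key [])]
           else acc)
          = acc ++ [(key, if d1.contains key = false then d2.getD key [] else d1.getD key [])] := by
      intro acc key
      by_cases h1 : d1.contains key = false
      · simp [h1]
      · have h1' : d1.contains key = true := by simpa using h1
        by_cases h2 : d2.contains key = false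
        · simp [h1, h2]
        · have h2' : d2.contains key = true := by simpa using h2
          have heq := hpre.1 key ((PySem.Dict.contains_iff_mem_keys d1 key).mp h1') h2'
          rw [← hd1, ← hd2] at heq
          simp [h1, h2, heq]
    rw [PySem.List.foldl_congr_mem _ _
          (fun acc key => acc ++ [(key, if d1.contains key = false then d2.getD key [] else d1.getD key [])]) _
          (fun acc key _ => hcongr acc key),
        PySem.List.foldl_append_singleton_eq_map
          (f := fun key => (key, if d1.contains key = false then d2.getD key [] else d1.getD key [])),
        List.nil_append,
        pv_union_shape d1.keys d2.keys hnd1 hnd2, List.map_append]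
    congr 1
    · rw [PySem.Dict.items_eq_map_keys d1 hnd1 []]
      apply List.map_congr_left
      intro k hk
      have : d1.contains k = true := (PySem.Dict.contains_iff_mem_keys d1 k).mpr hk
      simp [this]
    · rw [PySem.Dict.items_eq_map_keys d2 hnd2 [], List.filter_map]
      have hfil : (d2.keys.filter (fun y => !d1.keys.contains y))
          = d2.keys.filter ((fun p => !d1.contains p.1) ∘ (fun k => (k, d2.getD k []))) := by
        apply List.filter_congr
        intro k _
        simp [Function.comp, pv_dcontains_eq]
      rw [hfil]
      apply List.map_congr_left
      intro k hk
      have hk' : d1.contains k = false := by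
        have := List.of_mem_filter hk
        simpa [Function.comp, pv_dcontains_eq] using this
      simp [hk']
  rw [hM, cr_sorted2_eq_sorted_lex, cr_sorted2_eq_sorted_lex, cr_sorted2_eq_sorted_lex]
  set l1 := PySem.List.sorted d1.items cr_lexF with hl1
  set l2 := PySem.List.sorted d2.items cr_lexF with hl2
  have hp1 : l1.Perm d1.items := PySem.List.sorted_perm d1.items cr_lexF false
  have hp2 : l2.Perm d2.items := PySem.List.sorted_perm d2.items cr_lexF false
  -- the cross condition: a common name carries dict-equal values, hence an equal lex key
  have hcross : ∀ a ∈ l1, ∀ b ∈ l2, a.1 = b.1 → cr_lexF a = cr_lexF b := by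
    intro a ha b hb hn
    have ha' : a ∈ d1.items := hp1.mem_iff.mp ha
    have hb' : b ∈ d2.items := hp2.mem_iff.mp hb
    have hka : a.1 ∈ d1.keys := PySem.Dict.mem_keys_of_mem_items _ ha'
    have hkb : d2.contains a.1 = true := by
      rw [PySem.Dict.contains_iff_mem_keys]
      exact hn ▸ PySem.Dict.mem_keys_of_mem_items _ hb'
    have heq := hpre.1 a.1 hka hkb
    rw [← hd1, ← hd2] at heq
    have hga : d1.getD a.1 [] = a.2 := by
      obtain ⟨ka, va⟩ := a
      exact PySem.Dict.getD_of_mem_items _ ha' hnd1 []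
    have hgb : d2.getD a.1 [] = b.2 := by
      obtain ⟨kb, vb⟩ := b
      cases hn
      exact PySem.Dict.getD_of_mem_items _ hb' hnd2 []
    rw [hga, hgb] at heq
    simp only [cr_lexF, cr_keyT, hn, pv_dictEq_keyT heq]
  obtain ⟨hperm, hstrict⟩ := cr_merge_main (l1.length + l2.length) l1 l2 le_rfl
    (hl1 ▸ cr_sorted_items_strict region_1l)
    (hl2 ▸ cr_sorted_items_strict region_2l) hcross
  -- the merged run is a strictly sorted permutation of A's pre-sort list, hence is its sorted()
  have hpermM : (cr_merge l1 l2).Perm (d1.items ++ d2.items.filter (fun p => !d1.contains p.1)) := by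
    refine hperm.trans (List.Perm.append hp1 ?_)
    have hfc : l2.filter (fun b => !(l1.any (fun a => a.1 == b.1)))
        = l2.filter (fun b => !d1.contains b.1) := by
      apply List.filter_congr
      intro b _
      congr 1
      rw [Bool.eq_iff_iff, List.any_eq_true, PySem.Dict.contains_iff_mem_keys]
      constructor
      · rintro ⟨a, ha, he⟩
        rw [beq_iff_eq] at he
        exact he ▸ PySem.Dict.mem_keys_of_mem_items _ (hp1.mem_iff.mp ha)
      · intro hb
        simp only [PySem.Dict.keys, List.mem_map] at hb
        obtain ⟨p, hp, hpk⟩ := hb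
        exact ⟨p, hp1.mem_iff.mpr hp, beq_iff_eq.mpr hpk⟩
    rw [hfc]
    exact hp2.filter _
  exact PySem.List.sorted_eq_of_perm_of_pairwise_lt _ _ cr_lexF hpermM hstrict
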